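-- pv_equiv track=rewrite | github.com/hipotures/vocatio | scripts/pipeline/evaluate_ml_boundary_verifier.py | compute_review_cost_metrics
-- ===== SOURCE A (Python) =====
-- from typing import Iterable, Mapping, Sequence
--
-- def compute_review_cost_metrics(predicted: Sequence[int], truth: Sequence[int]) -> dict[str, int]:
--     predicted_values = list(predicted)
--     truth_values = list(truth)
--     if len(predicted_values) != len(truth_values):
--         raise ValueError("predicted and truth must have the same length")
--
--     merge_run_count = 0
--     in_false_split_run = False
--     split_run_count = 0
--
--     for predicted_value, truth_value in zip(predicted_values, truth_values):
--         is_false_split = predicted_value == 1 and truth_value == 0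
--         is_missed_split = predicted_value == 0 and truth_value == 1
--
--         if is_false_split:
--             if not in_false_split_run:
--                 merge_run_count += 1
--                 in_false_split_run = True
--         else:
--             in_false_split_run = False
--
--         if is_missed_split:
--             split_run_count += 1
--
--     return {
--         "merge_run_count": merge_run_count,
--         "split_run_count": split_run_count,
--         "estimated_correction_actions": merge_run_count + split_run_count,
--     }
-- ===== SOURCE B (Python) =====
-- def _run_length_encode(xs):
--     """Group xs into maximal runs of equal values, returning (value, run_length) pairs."""
--     runs = []
--     i = 0
--     n = len(xs)
--     while i < n:
--         j = i + 1
--         while j < n and xs[j] == xs[i]: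
--             j += 1
--         runs.append((xs[i], j - i))
--         i = j
--     return runs
--
--
-- def compute_review_cost_metrics(predicted, truth):
--     predicted_values = list(predicted)
--     truth_values = list(truth)
--     if len(predicted_values) != len(truth_values):
--         raise ValueError("predicted and truth must have the same length")
--     pairs = list(zip(predicted_values, truth_values))
--     flags = [p == 1 and t == 0 for p, t in pairs]
--     merge_run_count = sum(1 for key, _length in _run_length_encode(flags) if key)
--     split_run_count = sum(1 for p, t in pairs if p == 0 and t == 1)
--     return {
--         "merge_run_count": merge_run_count,
--         "split_run_count": split_run_count,
--         "estimated_correction_actions": merge_run_count + split_run_count,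
--     }
-- ===== Notes on version B (the rewrite author's own statement) =====
-- stated objective: alternative
-- what changed: Replaces A's single stateful loop carrying an in_false_split_run flag with a run-length encoding of the false-split flag list (a two-pointer groupby over maximal runs), counting the groups whose key is True, plus a separate pass counting missed splits.
import Mathlib
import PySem

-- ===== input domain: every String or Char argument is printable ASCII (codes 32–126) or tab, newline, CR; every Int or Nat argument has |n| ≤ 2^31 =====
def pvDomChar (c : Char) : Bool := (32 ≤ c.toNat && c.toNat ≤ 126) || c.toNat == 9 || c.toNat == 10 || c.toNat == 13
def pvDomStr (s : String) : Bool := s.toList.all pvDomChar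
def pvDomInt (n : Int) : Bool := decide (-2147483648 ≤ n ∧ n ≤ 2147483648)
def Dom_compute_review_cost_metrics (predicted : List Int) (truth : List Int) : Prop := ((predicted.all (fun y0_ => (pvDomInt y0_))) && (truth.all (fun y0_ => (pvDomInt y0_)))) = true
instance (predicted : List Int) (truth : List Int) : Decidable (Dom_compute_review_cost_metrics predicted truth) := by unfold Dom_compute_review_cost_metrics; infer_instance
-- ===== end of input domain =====

-- B replaces A's single stateful loop (in_false_split_run flag) with a run-length encoding of the
-- false-split flag list, counting True-keyed groups, plus a separate pass counting missed splits (alternative).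


-- ===== PORT A =====
-- loop body of A: state (merge_run_count, in_false_split_run, split_run_count)
def pvStepA (st : Int × Bool × Int) (pt : Int × Int) : Int × Bool × Int :=
  let is_false_split := pt.1 == 1 && pt.2 == 0
  let is_missed_split := pt.1 == 0 && pt.2 == 1
  let st1 :=
    if is_false_split then
      (if st.2.1 then st else (st.1 + 1, true, st.2.2))
    else (st.1, false, st.2.2)
  if is_missed_split then (st1.1, st1.2.1, st1.2.2 + 1) else st1

-- Python raises ValueError on a length mismatch; Pre_ excludes that, the port returns [] there.
def compute_review_cost_metrics (predicted : List Int) (truth : List Int) : List (String × Int) :=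
  if predicted.length ≠ truth.length then []
  else
    let st := (List.zip predicted truth).foldl pvStepA (0, false, 0)
    [("merge_run_count", st.1), ("split_run_count", st.2.2),
     ("estimated_correction_actions", st.1 + st.2.2)]

-- ===== PORT B =====
-- _run_length_encode: the outer while takes one maximal run per step (the inner while = span)
def pvRle (xs : List Bool) : List (Bool × Nat) :=
  match xs with
  | [] => []
  | x :: rest =>
    let s := rest.span (fun y => y == x)
    (x, s.1.length + 1) :: pvRle s.2
termination_by xs.length
decreasing_by
  simp only [List.span_eq_takeWhile_dropWhile]
  exact Nat.lt_succ_of_le (List.length_dropWhile_le _ _)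

def compute_review_cost_metrics_alt (predicted : List Int) (truth : List Int) : List (String × Int) :=
  if predicted.length ≠ truth.length then []
  else
    let pairs := List.zip predicted truth
    let flags := pairs.map (fun pt => pt.1 == 1 && pt.2 == 0)
    let merge : Int := (((pvRle flags).filter (fun r => r.1)).length : Int)
    let split : Int := ((pairs.filter (fun pt => pt.1 == 0 && pt.2 == 1)).length : Int)
    [("merge_run_count", merge), ("split_run_count", split),
     ("estimated_correction_actions", merge + split)]

-- ===== PRECONDITION & SPEC =====
-- Pre_ excludes exactly the inputs on which A raises ValueError (length mismatch); B raises there too.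
def Pre_compute_review_cost_metrics (predicted : List Int) (truth : List Int) : Prop :=
  predicted.length = truth.length
instance (predicted : List Int) (truth : List Int) : Decidable (Pre_compute_review_cost_metrics predicted truth) := by unfold Pre_compute_review_cost_metrics; infer_instance
def pvWitness_compute_review_cost_metrics : List Int × List Int := ([1, 0, 1, 1], [0, 1, 0, 0])

def Spec_compute_review_cost_metrics (predicted : List Int) (truth : List Int) (out : List (String × Int)) : Prop := out = compute_review_cost_metrics_alt predicted truth
instance (predicted : List Int) (truth : List Int) (out : List (String × Int)) : Decidable (Spec_compute_review_cost_metrics predicted truth out) := by unfold Spec_compute_review_cost_metrics; infer_instance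

-- ===== CLAIM (what is proved, stated in full; the proofs are below) =====
def Claim_equal_compute_review_cost_metrics : Prop := ∀ (predicted : List Int) (truth : List Int), Dom_compute_review_cost_metrics predicted truth → Pre_compute_review_cost_metrics predicted truth → Spec_compute_review_cost_metrics predicted truth (compute_review_cost_metrics predicted truth)

-- ===== LEMMAS AND PROOFS =====
-- proof-only helper: runs of `true` in a flag list, given the previous flag
def pvRunCount (b : Bool) : List Bool → Nat
  | [] => 0
  | f :: fs => (if f && !b then 1 else 0) + pvRunCount f fs

-- A's fold computes pvRunCount (and the missed-split filter count)
lemma pvLoop (l : List (Int × Int)) : ∀ (m s : Int) (b : Bool),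
    (l.foldl pvStepA (m, b, s)).1
      = m + (pvRunCount b (l.map (fun pt => pt.1 == 1 && pt.2 == 0)) : Int)
    ∧ (l.foldl pvStepA (m, b, s)).2.2
      = s + (((l.filter (fun pt => pt.1 == 0 && pt.2 == 1)).length : Int)) := by
  induction l with
  | nil => intro m s b; simp [pvRunCount]
  | cons hd tl ih =>
    intro m s b
    obtain ⟨p, t⟩ := hd
    by_cases hf : (p == 1 && t == 0) = true
    · have hm : (p == 0 && t == 1) = false := by
        simp only [Bool.and_eq_true, beq_iff_eq] at hf ⊢
        simp [hf.1]
      by_cases hb : b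
      · subst hb
        have := ih m s true
        simp only [List.foldl_cons, pvStepA, hf, hm, if_true, if_false, Bool.false_eq_true]
        refine ⟨?_, by rw [this.2]; simp [hm]⟩
        rw [this.1]; simp [pvRunCount, hf]
      · have hb' : b = false := by simpa using hb
        subst hb'
        have := ih (m + 1) s true
        simp only [List.foldl_cons, pvStepA, hf, hm, if_true, if_false, Bool.false_eq_true]
        refine ⟨?_, by rw [this.2]; simp [hm]⟩
        rw [this.1]; simp [pvRunCount, hf]; ring
    · have hf' : (p == 1 && t == 0) = false := by simpa using hf
      by_cases hm : (p == 0 && t == 1) = true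
      · have := ih m (s + 1) false
        simp only [List.foldl_cons, pvStepA, hf', hm, if_true, Bool.false_eq_true, if_false]
        refine ⟨?_, by rw [this.2]; simp [hm]; ring⟩
        rw [this.1]; simp [pvRunCount, hf']
      · have hm' : (p == 0 && t == 1) = false := by simpa using hm
        have := ih m s false
        simp only [List.foldl_cons, pvStepA, hf', hm', Bool.false_eq_true, if_false]
        refine ⟨?_, by rw [this.2]; simp [hm']⟩
        rw [this.1]; simp [pvRunCount, hf']

-- skipping a maximal run of x leaves the run count as if the previous flag were false
lemma pvRunCount_dropWhile (x : Bool) (l : List Bool) :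
    pvRunCount x l = pvRunCount false (l.dropWhile (fun y => y == x)) := by
  induction l generalizing x with
  | nil => rfl
  | cons y ys ih =>
    by_cases h : y = x
    · subst h
      simp only [List.dropWhile_cons, beq_self_eq_true, if_true, pvRunCount]
      rw [← ih y]
      cases y <;> simp
    · have hne : (y == x) = false := by simpa using h
      simp only [List.dropWhile_cons, hne, Bool.false_eq_true, if_false, pvRunCount]
      cases x <;> cases y <;> simp_all
-- B's RLE True-group count equals pvRunCount false
lemma pvRle_count (xs : List Bool) :
    ((pvRle xs).filter (fun r => r.1)).length = pvRunCount false xs := by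
  induction xs using pvRle.induct with
  | case1 => simp [pvRle, pvRunCount]
  | case2 x rest s ih =>
    rw [pvRle]
    have hdrop : (rest.span (fun y => y == x)).2 = rest.dropWhile (fun y => y == x) := by
      simp [List.span_eq_takeWhile_dropWhile]
    simp only [s] at ih
    rw [List.filter_cons]
    cases x with
    | false =>
      rw [if_neg (by simp), ih, hdrop, ← pvRunCount_dropWhile false rest]
      simp [pvRunCount]
    | true =>
      rw [if_pos rfl, List.length_cons, ih, hdrop, ← pvRunCount_dropWhile true rest]
      simp [pvRunCount, Nat.add_comm]

-- ===== VERDICT (by name: the statement is the Claim_ definition above) =====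
theorem compute_review_cost_metrics_spec : Claim_equal_compute_review_cost_metrics := by
  intro predicted truth _ hpre
  unfold Spec_compute_review_cost_metrics compute_review_cost_metrics compute_review_cost_metrics_alt
  have h := pvLoop (List.zip predicted truth) 0 0 false
  simp only [hpre, ne_eq, not_true_eq_false, if_false]
  rw [h.1, h.2, ← pvRle_count]
  simp
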